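-- pv_equiv track=rewrite | github.com/pritomtanvir/HomeworksForAI | hw1.py | flip
-- ===== SOURCE A (Python) =====
-- def flip(lis, length):
--     flippedList = lis[:]
--     temp ="z"
--     for i in range(0, length+1):
--         flippedList[i] = flippedList[i].replace("b", temp)
--         flippedList[i] = flippedList[i].replace("w", "b")
--         flippedList[i] = flippedList[i].replace(temp, "w")
--
--     i = 0
--     while(i<=length):
--         temp = flippedList[i]
--         flippedList[i] = flippedList[length]
--         flippedList[length] = temp
--         i = i + 1
--         length = length-1
--
--     return flippedList
-- ===== SOURCE B (Python) =====
-- _FLIP = str.maketrans("bwz", "wbw")  # A's replace chain b->temp('z'), w->b, temp->w maps b->w, w->b and z->w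
--
-- def flip(lis, length):
--     out = lis[:]
--     for i in range(length + 1):
--         out[i] = lis[length - i].translate(_FLIP)
--     return out
-- ===== Notes on version B (the rewrite author's own statement) =====
-- stated objective: alternative
-- what changed: B replaces A's two phases (a flip pass of three in-place replace() calls per element followed by a two-index swap loop reversing the prefix) with a single pass that writes the character-flipped mirror element lis[length-i] (via one translate table) directly into slot i of a fresh copy.
import Mathlib
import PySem

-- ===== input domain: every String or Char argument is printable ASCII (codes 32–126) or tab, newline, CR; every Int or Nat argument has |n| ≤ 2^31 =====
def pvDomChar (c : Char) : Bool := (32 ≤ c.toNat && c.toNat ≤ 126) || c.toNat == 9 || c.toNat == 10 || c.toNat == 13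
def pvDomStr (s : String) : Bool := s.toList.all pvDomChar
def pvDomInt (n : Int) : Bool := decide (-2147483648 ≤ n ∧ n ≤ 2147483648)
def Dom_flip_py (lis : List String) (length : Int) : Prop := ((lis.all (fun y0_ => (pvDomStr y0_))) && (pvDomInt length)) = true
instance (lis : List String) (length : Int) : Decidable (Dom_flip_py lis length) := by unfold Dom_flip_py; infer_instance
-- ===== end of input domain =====

-- B fuses A's flip pass and A's in-place prefix-reversal loop into one pass that writes the
-- char-flipped mirror element straight to its final slot (A's 'z' sentinel makes the flip map 'z' to 'w'; B keeps that exact character map).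

-- ===== PORT A =====
-- the three-replace chain of A's first loop body
def flipA_str (s : String) : String :=
  PySem.Str.replace (PySem.Str.replace (PySem.Str.replace s "b" "z") "w" "b") "z" "w"

-- A's while loop: swap positions i and length, i += 1, length -= 1
def flip_py_swap (xs : List String) (i L : Int) : List String :=
  if _h : i ≤ L then
    flip_py_swap
      (PySem.List.pySetD (PySem.List.pySetD xs i (PySem.List.pyGetD xs L "")) L
        (PySem.List.pyGetD xs i "")) (i + 1) (L - 1)
  else xs
termination_by (L - i + 1).toNat
decreasing_by omega

def flip_py (lis : List String) (length : Int) : List String :=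
  let flipped := (PySem.List.pyRange 0 (length + 1) 1).foldl
    (fun acc i => PySem.List.pySetD acc i (flipA_str (PySem.List.pyGetD acc i ""))) lis
  flip_py_swap flipped 0 length

-- ===== PORT B =====
-- str.translate(str.maketrans("bwz", "wbw")), ported as a per-character map
def flipB_char (c : Char) : Char :=
  if c = 'b' then 'w' else if c = 'w' then 'b' else if c = 'z' then 'w' else c

def flipB_str (s : String) : String := String.ofList (s.toList.map flipB_char)

def flip_py_alt (lis : List String) (length : Int) : List String :=
  (PySem.List.pyRange 0 (length + 1) 1).foldl
    (fun acc i => PySem.List.pySetD acc i (flipB_str (PySem.List.pyGetD lis (length - i) ""))) lis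

-- ===== PRECONDITION & SPEC =====
-- A raises IndexError exactly when length ≥ len(lis) (its first loop reads lis[length]); nothing else is excluded.
def Pre_flip_py (lis : List String) (length : Int) : Prop := length < (lis.length : Int)
instance (lis : List String) (length : Int) : Decidable (Pre_flip_py lis length) := by
  unfold Pre_flip_py; infer_instance

def pvWitness_flip_py : List String × Int := (["bw", "wz", "a"], 1)

def Spec_flip_py (lis : List String) (length : Int) (out : List String) : Prop := out = flip_py_alt lis length
instance (lis : List String) (length : Int) (out : List String) : Decidable (Spec_flip_py lis length out) := by unfold Spec_flip_py; infer_instance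

-- ===== CLAIM (what is proved, stated in full; the proofs are below) =====
def Claim_equal_flip_py : Prop := ∀ (lis : List String) (length : Int), Dom_flip_py lis length → Pre_flip_py lis length → Spec_flip_py lis length (flip_py lis length)

-- ===== LEMMAS AND PROOFS =====

-- replace with a single-char pattern is a character map (helper for flipA_eq_flipB)
lemma go_single (c d : Char) : ∀ (fuel : Nat) (l acc : List Char), l.length ≤ fuel →
    PySem.Chars.replace.go [c] [d] fuel l acc
      = acc.reverse ++ l.map (fun x => if x = c then d else x) := by
  intro fuel
  induction fuel with
  | zero =>
    intro l acc h
    have : l = [] := List.length_eq_zero_iff.mp (Nat.le_zero.mp h)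
    subst this
    simp [PySem.Chars.replace.go]
  | succ n ih =>
    intro l acc h
    cases l with
    | nil => simp [PySem.Chars.replace.go]
    | cons x t =>
      rw [PySem.Chars.replace.go]
      simp only [List.length_cons] at h
      by_cases hx : x = c
      · subst hx
        have hpre : [x].isPrefixOf (x :: t) = true := by simp [List.isPrefixOf]
        rw [if_pos hpre]
        have hd : List.drop ([x].length) (x :: t) = t := by simp
        rw [hd, ih _ _ (by omega)]
        simp
      · have hpre : [c].isPrefixOf (x :: t) = false := by
          simp [List.isPrefixOf]; exact fun hc => (hx hc.symm).elim
        rw [if_neg (by simp [hpre])]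
        rw [ih _ _ (by omega)]
        simp [hx]

lemma replace_single (c d : Char) (l : List Char) :
    PySem.Chars.replace l [c] [d] = l.map (fun x => if x = c then d else x) := by
  rw [PySem.Chars.replace]
  simp only [List.isEmpty_cons, if_false, Bool.false_eq_true]
  exact go_single c d l.length l [] le_rfl

lemma flipA_eq_flipB (s : String) : flipA_str s = flipB_str s := by
  have h : (flipA_str s).toList = (flipB_str s).toList := by
    simp only [flipA_str, flipB_str, PySem.Str.toList_replace, String.toList_ofList]
    have hb : ("b" : String).toList = ['b'] := rfl
    have hw : ("w" : String).toList = ['w'] := rfl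
    have hz : ("z" : String).toList = ['z'] := rfl
    rw [hb, hw, hz, replace_single, replace_single, replace_single]
    simp only [List.map_map]
    refine List.map_congr_left ?_
    intro x _
    simp only [Function.comp]
    by_cases h1 : x = 'b' <;> by_cases h2 : x = 'w' <;> by_cases h3 : x = 'z' <;>
      simp_all [flipB_char]
  calc flipA_str s = String.ofList (flipA_str s).toList := String.ofList_toList.symm
    _ = String.ofList (flipB_str s).toList := by rw [h]
    _ = flipB_str s := String.ofList_toList

-- B's loop: k writes at positions 0..k-1, values depending only on the index
lemma bfold_spec (v : Int → String) : ∀ (k : Nat) (xs : List String), k ≤ xs.length →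
    ((PySem.List.pyRange 0 (k : Int) 1).foldl
        (fun acc i => PySem.List.pySetD acc i (v i)) xs).length = xs.length ∧
    ∀ j : Nat, ((PySem.List.pyRange 0 (k : Int) 1).foldl
        (fun acc i => PySem.List.pySetD acc i (v i)) xs)[j]?
      = if j < k then some (v (j : Int)) else xs[j]? := by
  intro k
  induction k with
  | zero =>
    intro xs _
    rw [PySem.List.pyRange_one_eq_nil (by omega)]
    simp
  | succ n ih =>
    intro xs hk
    have hc : ((n + 1 : Nat) : Int) = (n : Int) + 1 := by push_cast; ring
    rw [hc, PySem.List.pyRange_one_succ_right (by positivity), List.foldl_append]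
    obtain ⟨ihlen, ihget⟩ := ih xs (by omega)
    simp only [List.foldl_cons, List.foldl_nil, PySem.List.pySetD_natCast]
    constructor
    · rw [List.length_set, ihlen]
    · intro j
      rw [List.getElem?_set]
      by_cases hj : n = j
      · subst hj
        rw [if_pos rfl, if_pos (by omega), if_pos (by omega)]
      · rw [if_neg hj, ihget j]
        by_cases h1 : j < n
        · rw [if_pos h1, if_pos (by omega)]
        · rw [if_neg h1, if_neg (by omega)]

-- A's first loop: k in-place updates, each reading the not-yet-touched slot it writes
lemma afold_spec (f : String → String) : ∀ (k : Nat) (xs : List String), k ≤ xs.length →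
    ((PySem.List.pyRange 0 (k : Int) 1).foldl
        (fun acc i => PySem.List.pySetD acc i (f (PySem.List.pyGetD acc i ""))) xs).length = xs.length ∧
    ∀ j : Nat, ((PySem.List.pyRange 0 (k : Int) 1).foldl
        (fun acc i => PySem.List.pySetD acc i (f (PySem.List.pyGetD acc i ""))) xs)[j]?
      = if j < k then some (f (xs.getD j "")) else xs[j]? := by
  intro k
  induction k with
  | zero =>
    intro xs _
    rw [PySem.List.pyRange_one_eq_nil (by omega)]
    simp
  | succ n ih =>
    intro xs hk
    have hc : ((n + 1 : Nat) : Int) = (n : Int) + 1 := by push_cast; ring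
    rw [hc, PySem.List.pyRange_one_succ_right (by positivity), List.foldl_append]
    obtain ⟨ihlen, ihget⟩ := ih xs (by omega)
    simp only [List.foldl_cons, List.foldl_nil, PySem.List.pySetD_natCast,
      PySem.List.pyGetD_natCast]
    set acc := (PySem.List.pyRange 0 (n : Int) 1).foldl
        (fun acc i => PySem.List.pySetD acc i (f (PySem.List.pyGetD acc i ""))) xs with hacc
    have hval : acc.getD n "" = xs.getD n "" := by
      have h1 := ihget n
      rw [if_neg (by omega)] at h1
      simp [List.getD, h1]
    rw [hval]
    constructor
    · rw [List.length_set, ihlen]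
    · intro j
      rw [List.getElem?_set]
      by_cases hj : n = j
      · subst hj
        rw [if_pos rfl, if_pos (by omega), if_pos (by omega)]
      · rw [if_neg hj, ihget j]
        by_cases h1 : j < n
        · rw [if_pos h1, if_pos (by omega)]
        · rw [if_neg h1, if_neg (by omega)]

-- A's while loop reverses the segment [i, L] in place
lemma swap_spec : ∀ (n : Nat) (xs : List String) (i L : Int), (L - i + 1).toNat ≤ n → 0 ≤ i →
    L < (xs.length : Int) →
    (flip_py_swap xs i L).length = xs.length ∧
    ∀ j : Nat, (flip_py_swap xs i L)[j]?
      = if i ≤ (j : Int) ∧ (j : Int) ≤ L then xs[(i + L - (j : Int)).toNat]? else xs[j]? := by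
  intro n
  induction n with
  | zero =>
    intro xs i L hn hi hL
    have hiL : ¬ i ≤ L := by omega
    rw [flip_py_swap, dif_neg hiL]
    refine ⟨rfl, fun j => ?_⟩
    rw [if_neg (by omega)]
  | succ n ih =>
    intro xs i L hn hi hL
    by_cases hiL : i ≤ L
    · rw [flip_py_swap, dif_pos hiL]
      have hi' : (0:Int) ≤ L := by omega
      set xs' := PySem.List.pySetD (PySem.List.pySetD xs i (PySem.List.pyGetD xs L "")) L
        (PySem.List.pyGetD xs i "") with hxs'
      have hlen' : xs'.length = xs.length := by
        simp [hxs', PySem.List.length_pySetD]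
      have hget' : ∀ j : Nat, xs'[j]? =
          if (j : Int) = i then xs[L.toNat]? else if (j : Int) = L then xs[i.toNat]? else xs[j]? := by
        intro j
        rw [hxs', PySem.List.pySetD_of_nonneg _ _ hi', PySem.List.pySetD_of_nonneg _ _ hi,
          PySem.List.pyGetD_of_nonneg _ _ hi', PySem.List.pyGetD_of_nonneg _ _ hi]
        have hLlt : L.toNat < xs.length := by omega
        have hilt : i.toNat < xs.length := by omega
        rw [List.getElem?_set, List.getElem?_set]
        by_cases hjL : (j : Int) = L
        · have hLj : L.toNat = j := by omega
          rw [if_pos hLj, if_pos (by rw [List.length_set]; exact hLlt)]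
          by_cases hji : (j : Int) = i
          · rw [if_pos hji]
            have hiL2 : i.toNat = L.toNat := by omega
            rw [hiL2]
            simp [List.getD, List.getElem?_eq_getElem hLlt]
          · rw [if_neg hji, if_pos hjL]
            simp [List.getD, List.getElem?_eq_getElem hilt]
        · rw [if_neg (by omega)]
          by_cases hji : (j : Int) = i
          · have hij : i.toNat = j := by omega
            rw [if_pos hij, if_pos hilt, if_pos hji]
            simp [List.getD, List.getElem?_eq_getElem hLlt]
          · rw [if_neg (by omega), if_neg hji, if_neg hjL]
      obtain ⟨ihlen, ihget⟩ := ih xs' (i + 1) (L - 1) (by omega) (by omega) (by omega)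
      refine ⟨by rw [ihlen, hlen'], fun j => ?_⟩
      rw [ihget j]
      by_cases hin : i + 1 ≤ (j : Int) ∧ (j : Int) ≤ L - 1
      · rw [if_pos hin, if_pos (by omega)]
        have harith : (i + 1 + (L - 1) - (j : Int)) = (i + L - (j : Int)) := by ring
        rw [harith]
        have hm : (0:Int) ≤ i + L - (j : Int) := by omega
        have hmn : ((i + L - (j : Int)).toNat : Int) = i + L - (j : Int) := by omega
        rw [hget' (i + L - (j : Int)).toNat, hmn]
        rw [if_neg (by omega), if_neg (by omega)]
      · rw [if_neg hin, hget' j]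
        by_cases hji : (j : Int) = i
        · rw [if_pos hji, if_pos (by omega)]
          have : (i + L - (j : Int)).toNat = L.toNat := by omega
          rw [this]
        · rw [if_neg hji]
          by_cases hjL : (j : Int) = L
          · rw [if_pos hjL, if_pos (by omega)]
            have : (i + L - (j : Int)).toNat = i.toNat := by omega
            rw [this]
          · rw [if_neg hjL, if_neg (by omega)]
    · rw [flip_py_swap, dif_neg hiL]
      refine ⟨rfl, fun j => ?_⟩
      rw [if_neg (by omega)]

-- ===== VERDICT (by name: the statement is the Claim_ definition above) =====
theorem flip_py_spec : Claim_equal_flip_py := by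
  unfold Claim_equal_flip_py Spec_flip_py
  intro lis length _hDom hPre
  unfold Pre_flip_py at hPre
  by_cases hneg : length < 0
  · have hnil : PySem.List.pyRange 0 (length + 1) 1 = [] :=
      PySem.List.pyRange_one_eq_nil (by omega)
    unfold flip_py flip_py_alt
    rw [hnil]
    simp only [List.foldl_nil]
    rw [flip_py_swap, dif_neg (by omega)]
  · set L := length.toNat with hLdef
    have hLen : length = (L : Int) := by omega
    have hLlt : L < lis.length := by omega
    have hcast : length + 1 = ((L + 1 : Nat) : Int) := by omega
    obtain ⟨alen, aget⟩ := afold_spec flipA_str (L + 1) lis (by omega)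
    obtain ⟨blen, bget⟩ := bfold_spec
      (fun i => flipB_str (PySem.List.pyGetD lis (length - i) "")) (L + 1) lis (by omega)
    unfold flip_py flip_py_alt
    rw [hcast]
    set flipped := (PySem.List.pyRange 0 ((L + 1 : Nat) : Int) 1).foldl
      (fun acc i => PySem.List.pySetD acc i (flipA_str (PySem.List.pyGetD acc i ""))) lis with hflip
    obtain ⟨slen, sget⟩ := swap_spec (length - 0 + 1).toNat flipped 0 length le_rfl le_rfl
      (by rw [alen]; omega)
    apply List.ext_getElem?
    intro j
    rw [sget j, bget j]
    by_cases hj : (j : Int) ≤ length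
    · rw [if_pos ⟨by omega, hj⟩, if_pos (by omega)]
      have hm : (0 + length - (j : Int)).toNat = L - j := by omega
      rw [hm, aget (L - j), if_pos (by omega)]
      have hc2 : length - (j : Int) = ((L - j : Nat) : Int) := by omega
      rw [hc2, PySem.List.pyGetD_natCast, flipA_eq_flipB]
    · rw [if_neg (by omega), aget j, if_neg (by omega), if_neg (by omega)]
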